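-- pv_equiv track=rewrite | github.com/hydraxic/NurikabeGen | nurikabeuniqueness.py | is_single_contiguous_water
-- ===== SOURCE A (Python) =====
-- WATER = -1  # Black cell (sea)
--
-- def is_single_contiguous_water(grid):
--     """
--     Checks if all water cells form a single contiguous area.
--     """
--     visited = set()
--     found_water = False
--     for x in range(len(grid)):
--         for y in range(len(grid[0])):
--             if grid[x][y] == WATER:
--                 if found_water:
--                     return bfs_check_water(grid, x, y, visited) == sum(
--                         1 for row in grid for cell in row if cell == WATER
--                     )
--                 else:
--                     found_water = True
--     return True
--
-- def bfs_check_water(grid, start_x, start_y, visited):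
--     """
--     Performs BFS to count all contiguous water cells.
--     """
--     queue = [(start_x, start_y)]
--     count = 0
--     while queue:
--         x, y = queue.pop()
--         if (x, y) in visited:
--             continue
--         visited.add((x, y))
--         if grid[x][y] != WATER:
--             return 0
--         count += 1
--         for nx, ny in neighbors(grid, x, y):
--             if (nx, ny) not in visited and grid[nx][ny] == WATER:
--                 queue.append((nx, ny))
--     return count
--
-- def neighbors(grid, x, y):
--     """
--     Returns the valid neighbors of a cell in the grid.
--     """
--     directions = [(0, 1), (1, 0), (0, -1), (-1, 0)]
--     for dx, dy in directions:
--         nx, ny = x + dx, y + dy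
--         if 0 <= nx < len(grid) and 0 <= ny < len(grid[0]):
--             yield nx, ny
-- ===== SOURCE B (Python) =====
-- WATER = -1  # Black cell (sea)
--
-- def is_single_contiguous_water(grid):
--     """
--     Checks if all water cells form a single contiguous area.
--
--     Collects the water cells once, then grows a reachable set from the first
--     water cell by repeated one-step expansion (a set fixpoint, no queue): all
--     water is contiguous iff the fixpoint covers every water cell.
--     """
--     water = [(x, y) for x, row in enumerate(grid) for y, v in enumerate(row) if v == WATER]
--     if len(water) <= 1:
--         return True
--     waterset = set(water)
--     reach = {water[0]}
--     for _ in range(len(water)):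
--         reach = reach | {(x + dx, y + dy)
--                          for (x, y) in reach
--                          for dx, dy in ((0, 1), (1, 0), (0, -1), (-1, 0))
--                          if (x + dx, y + dy) in waterset}
--     return len(reach) == len(water)
-- ===== Notes on version B (the rewrite author's own statement) =====
-- stated objective: alternative
-- what changed: Replaces A's stack-based flood fill started at the second water cell (plus a separate full-grid water count to compare against) by collecting the water cells once and saturating a reachable set from the first water cell with repeated one-step neighbour expansion, then comparing set sizes.
-- outside the precondition, e.g. on is_single_contiguous_water([[0, -1], [0]]): A raises IndexError, B returns True; on is_single_contiguous_water([[-1], [-1, -1], [0]]): A returns False, B returns True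
import Mathlib
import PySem

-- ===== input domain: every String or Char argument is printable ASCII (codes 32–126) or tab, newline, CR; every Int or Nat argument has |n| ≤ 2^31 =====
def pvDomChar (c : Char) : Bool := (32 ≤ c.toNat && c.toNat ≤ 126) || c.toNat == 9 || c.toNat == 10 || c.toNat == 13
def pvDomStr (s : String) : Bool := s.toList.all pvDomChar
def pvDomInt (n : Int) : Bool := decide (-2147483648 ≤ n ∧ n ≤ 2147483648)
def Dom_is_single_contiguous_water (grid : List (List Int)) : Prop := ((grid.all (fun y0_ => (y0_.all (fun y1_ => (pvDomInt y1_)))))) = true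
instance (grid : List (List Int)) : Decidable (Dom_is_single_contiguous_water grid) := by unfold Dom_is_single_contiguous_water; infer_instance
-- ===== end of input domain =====

-- B replaces A's stack-based flood fill (from the second water cell, compared with a
-- separate total count) by a saturating one-step set expansion from the first water
-- cell; equal on rectangular grids (objective: alternative, not claimed faster).

-- ===== PORT A =====
-- sum(1 for row in grid for cell in row if cell == WATER)
def pvAtotal (grid : List (List Int)) : Int :=
  grid.foldl (fun acc row => row.foldl (fun a c => if c = -1 then a + 1 else a) acc) 0

-- neighbors(grid, x, y)
def pvAneighbors (grid : List (List Int)) (x y : Int) : List (Int × Int) :=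
  ([((0:Int),(1:Int)), (1,0), (0,-1), (-1,0)]).filterMap (fun d =>
    let nx := x + d.1
    let ny := y + d.2
    if 0 ≤ nx ∧ nx < (grid.length : Int) ∧ 0 ≤ ny ∧ ny < ((grid.headD []).length : Int)
    then some (nx, ny) else none)

-- grid[x][y] (none = IndexError)
def pvAget (grid : List (List Int)) (c : Int × Int) : Option Int :=
  (PySem.List.pyGet? grid c.1).bind (fun row => PySem.List.pyGet? row c.2)

-- termination-measure helpers for the worklist loop (not part of A's algorithm)
def pvAcellBound (grid : List (List Int)) : Nat :=
  grid.foldr (fun r m => max r.length m) 0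

def pvAcells (grid : List (List Int)) : Finset (Int × Int) :=
  ((PySem.List.pyRange (-(grid.length : Int)) ((grid.length : Int) + 1) 1).flatMap (fun x =>
    (PySem.List.pyRange (-(pvAcellBound grid : Int)) ((pvAcellBound grid : Int) + 1) 1).map
      (fun y => (x, y)))).toFinset

theorem pvAget_mem_cells {grid : List (List Int)} {c : Int × Int} {v : Int}
    (h : pvAget grid c = some v) : c ∈ pvAcells grid := by
  unfold pvAget at h
  cases hr : PySem.List.pyGet? grid c.1 with
  | none => simp [hr] at h
  | some row =>
    rw [hr] at h
    simp only [Option.bind_some] at h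
    have h1 : PySem.Raise.InRange grid.length c.1 := by
      by_contra hc
      have : PySem.List.pyGet? grid c.1 = none := (PySem.List.pyGet?_eq_none_iff _ _).2 hc
      rw [this] at hr; simp at hr
    have h2 : PySem.Raise.InRange row.length c.2 := by
      by_contra hc
      have : PySem.List.pyGet? row c.2 = none := (PySem.List.pyGet?_eq_none_iff _ _).2 hc
      rw [this] at h; simp at h
    have hrow : row ∈ grid := PySem.List.mem_of_pyGet?_eq_some _ hr
    have hb : row.length ≤ pvAcellBound grid := by
      clear h hr h1 h2
      induction grid with
      | nil => cases hrow
      | cons r g ih =>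
        rcases List.mem_cons.1 hrow with rfl | hm
        · simp [pvAcellBound]
        · simp only [pvAcellBound, List.foldr_cons]
          exact le_trans (ih hm) (le_max_right _ _)
    unfold PySem.Raise.InRange at h1 h2
    simp only [pvAcells, List.mem_toFinset, List.mem_flatMap, List.mem_map,
      PySem.List.mem_pyRange_one]
    exact ⟨c.1, by omega, c.2, by omega, rfl⟩

-- bfs_check_water (the 'while queue' worklist loop; queue.pop() pops the LAST element)
def pvAbfs (grid : List (List Int)) (queue : List (Int × Int))
    (visited : PySem.Set (Int × Int)) (count : Int) : Int :=
  match hq : queue.getLast? with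
  | none => count
  | some c =>
    let rest := queue.dropLast
    if hv : c ∈ visited then pvAbfs grid rest visited count
    else
      let visited' := PySem.Set.add visited c
      match hg : pvAget grid c with
      | none => 0   -- unreachable from the entry point: Python raises IndexError here
      | some v =>
        if v = -1 then
          pvAbfs grid (rest ++ (pvAneighbors grid c.1 c.2).filter
              (fun b => decide (b ∉ visited') && decide (pvAget grid b = some (-1)))) visited' (count + 1)
        else 0
  termination_by (((pvAcells grid).filter (fun c => c ∉ visited)).card, queue.length)
  decreasing_by
  · apply Prod.Lex.right
    have hne : queue ≠ [] := by intro h; subst h; simp at hq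
    have : 0 < queue.length := List.length_pos_iff.2 hne
    simp only [List.length_dropLast]; omega
  · apply Prod.Lex.left
    apply Finset.card_lt_card
    constructor
    · intro a ha
      simp only [Finset.mem_filter] at ha ⊢
      exact ⟨ha.1, fun hmem => ha.2 ((PySem.Set.mem_add _ _ _).2 (Or.inl hmem))⟩
    · intro hsub
      have hc : c ∈ (pvAcells grid).filter (fun c' => c' ∉ visited) := by
        simp only [Finset.mem_filter]
        exact ⟨pvAget_mem_cells hg, hv⟩
      have := hsub hc
      simp only [Finset.mem_filter] at this
      exact this.2 ((PySem.Set.mem_add _ _ _).2 (Or.inr rfl))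

-- the row-major pairs (x, y) visited by 'for x in range(len(grid)): for y in range(len(grid[0]))'
def pvAcoords (grid : List (List Int)) : List (Int × Int) :=
  (PySem.List.pyRange 0 (grid.length : Int) 1).flatMap (fun x =>
    (PySem.List.pyRange 0 (((grid.headD []).length : Nat) : Int) 1).map (fun y => (x, y)))

-- the double scan with the found_water flag and the early return
def pvAloop (grid : List (List Int)) (coords : List (Int × Int)) (found : Bool) : Bool :=
  match coords with
  | [] => true
  | c :: rest =>
    if pvAget grid c = some (-1) then
      if found then decide (pvAbfs grid [c] PySem.Set.empty 0 = pvAtotal grid)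
      else pvAloop grid rest true
    else pvAloop grid rest found

def is_single_contiguous_water (grid : List (List Int)) : Bool :=
  pvAloop grid (pvAcoords grid) false

-- ===== PORT B =====
def pvBdirs : List (Int × Int) := [(0, 1), (1, 0), (0, -1), (-1, 0)]

-- [(x, y) for x, row in enumerate(grid) for y, v in enumerate(row) if v == WATER]
def pvBwater (grid : List (List Int)) : List (Int × Int) :=
  (PySem.List.enumerate grid 0).flatMap (fun xr =>
    (PySem.List.enumerate xr.2 0).filterMap (fun yv =>
      if yv.2 = -1 then some (xr.1, yv.1) else none))

-- one round of 'reach = reach | {(x+dx, y+dy) … if (x+dx, y+dy) in waterset}'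
def pvBstep (waterset : PySem.Set (Int × Int)) (reach : PySem.Set (Int × Int)) :
    PySem.Set (Int × Int) :=
  PySem.Set.update reach
    (reach.flatMap (fun c => pvBdirs.filterMap (fun d =>
      if (c.1 + d.1, c.2 + d.2) ∈ waterset then some (c.1 + d.1, c.2 + d.2) else none)))

def is_single_contiguous_water_alt (grid : List (List Int)) : Bool :=
  let water := pvBwater grid
  if water.length ≤ 1 then true
  else
    let waterset : PySem.Set (Int × Int) := PySem.Set.ofList water
    let reach0 : PySem.Set (Int × Int) := PySem.Set.ofList [water.headD (0, 0)]
    let reach := (List.range water.length).foldl (fun r _ => pvBstep waterset r) reach0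
    decide (reach.length = water.length)

-- ===== PRECONDITION & SPEC =====
-- Pre_ excludes grids with a row shorter than row 0 (there the Python A raises
-- IndexError) and grids with a water cell in a column ≥ len(grid[0]) of a longer row
-- (there A's value mixes a scan windowed to len(grid[0]) columns with a total count
-- over the full rows — an artefact of the implementation on inputs the Nurikabe
-- generator never produces).
def Pre_is_single_contiguous_water (grid : List (List Int)) : Prop :=
  ∀ row ∈ grid, (grid.headD []).length ≤ row.length ∧
    ∀ c ∈ row.drop (grid.headD []).length, c ≠ -1
instance (grid : List (List Int)) : Decidable (Pre_is_single_contiguous_water grid) := by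
  unfold Pre_is_single_contiguous_water; infer_instance

def pvWitness_is_single_contiguous_water : List (List Int) := [[-1, 0], [0, -1]]

def Spec_is_single_contiguous_water (grid : List (List Int)) (out : Bool) : Prop := out = is_single_contiguous_water_alt grid
instance (grid : List (List Int)) (out : Bool) : Decidable (Spec_is_single_contiguous_water grid out) := by unfold Spec_is_single_contiguous_water; infer_instance

-- ===== CLAIM (what is proved, stated in full; the proofs are below) =====
def Claim_equal_is_single_contiguous_water : Prop := ∀ (grid : List (List Int)), Dom_is_single_contiguous_water grid → Pre_is_single_contiguous_water grid → Spec_is_single_contiguous_water grid (is_single_contiguous_water grid)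

-- ===== LEMMAS AND PROOFS =====

-- adjacency of two water cells
def pvAdj (grid : List (List Int)) (a b : Int × Int) : Prop :=
  a ∈ pvBwater grid ∧ b ∈ pvBwater grid ∧ (b.1 - a.1, b.2 - a.2) ∈ pvBdirs

-- reflexive-transitive closure = connectivity inside the water
def pvRTG (grid : List (List Int)) : (Int × Int) → (Int × Int) → Prop :=
  Relation.ReflTransGen (pvAdj grid)

theorem pvAdj_symm {grid : List (List Int)} {a b : Int × Int}
    (h : pvAdj grid a b) : pvAdj grid b a := by
  obtain ⟨ha, hb, hd⟩ := h
  refine ⟨hb, ha, ?_⟩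
  simp only [pvBdirs, List.mem_cons, Prod.mk.injEq] at hd ⊢
  rcases hd with h | h | h | h | h <;> simp_all <;> omega

theorem pvRTG_symm {grid : List (List Int)} {a b : Int × Int}
    (h : pvRTG grid a b) : pvRTG grid b a := by
  induction h with
  | refl => exact Relation.ReflTransGen.refl
  | tail _ hstep ih =>
    exact Relation.ReflTransGen.trans (Relation.ReflTransGen.single (pvAdj_symm hstep)) ih

theorem mem_water_iff {grid : List (List Int)} {c : Int × Int} :
    c ∈ pvBwater grid ↔ 0 ≤ c.1 ∧ 0 ≤ c.2 ∧ pvAget grid c = some (-1) := by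
  constructor
  · intro h
    simp only [pvBwater, List.mem_flatMap, List.mem_filterMap] at h
    obtain ⟨xr, hxr, yv, hyv, hif⟩ := h
    obtain ⟨i, hi, rfl⟩ := (PySem.List.mem_enumerate_iff _ _ _).1 hxr
    obtain ⟨j, hj, rfl⟩ := (PySem.List.mem_enumerate_iff _ _ _).1 hyv
    split_ifs at hif with hw
    · obtain rfl := Option.some.inj hif
      simp only [zero_add] at hw ⊢
      refine ⟨by simp, by simp, ?_⟩
      simp only [pvAget, PySem.List.pyGet?_natCast]
      simp only [List.getElem?_eq_getElem hi, Option.bind_some,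
        List.getElem?_eq_getElem hj]
      simp_all
  · rintro ⟨h1, h2, hget⟩
    obtain ⟨x, y⟩ := c
    obtain ⟨i, rfl⟩ := Int.eq_ofNat_of_zero_le h1
    obtain ⟨j, rfl⟩ := Int.eq_ofNat_of_zero_le h2
    simp only [pvAget, PySem.List.pyGet?_natCast] at hget
    cases hr : grid[i]? with
    | none => simp [hr] at hget
    | some row =>
      rw [hr] at hget
      simp only [Option.bind_some] at hget
      have hj : j < row.length := by
        by_contra hc
        rw [List.getElem?_eq_none (by omega)] at hget; cases hget
      have hi : i < grid.length := by
        by_contra hc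
        rw [List.getElem?_eq_none (by omega)] at hr; cases hr
      simp only [pvBwater, List.mem_flatMap, List.mem_filterMap]
      refine ⟨((i : Int), row), ?_, ((j : Int), (-1 : Int)), ?_, by simp⟩
      · rw [PySem.List.mem_enumerate_iff]
        exact ⟨i, hi, by simp [List.getElem?_eq_getElem hi] at hr; simp [hr]⟩
      · rw [PySem.List.mem_enumerate_iff]
        refine ⟨j, hj, ?_⟩
        have : row[j] = -1 := by
          have := List.getElem?_eq_getElem hj (l := row)
          rw [this] at hget; exact Option.some.inj hget
        simp [this]

def pvLex (a b : Int × Int) : Prop := a.1 < b.1 ∨ (a.1 = b.1 ∧ a.2 < b.2)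

theorem pvBwater_pairwise (grid : List (List Int)) : (pvBwater grid).Pairwise pvLex := by
  unfold pvBwater
  rw [List.pairwise_flatMap]
  constructor
  · intro xr hxr
    rw [List.pairwise_filterMap]
    apply List.Pairwise.imp ?_ (PySem.List.pairwise_lt_enumerate xr.2 0)
    intro a b hab u hu v hv
    split_ifs at hu hv
    · obtain rfl := Option.some.inj hu
      obtain rfl := Option.some.inj hv
      exact Or.inr ⟨rfl, hab⟩
    all_goals cases hu <;> cases hv
  · apply List.Pairwise.imp ?_ (PySem.List.pairwise_lt_enumerate grid 0)
    intro a b hab u hu v hv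
    simp only [List.mem_filterMap] at hu hv
    obtain ⟨_, _, hu⟩ := hu
    obtain ⟨_, _, hv⟩ := hv
    split_ifs at hu hv
    obtain rfl := Option.some.inj hu
    obtain rfl := Option.some.inj hv
    exact Or.inl hab

theorem nodup_water (grid : List (List Int)) : (pvBwater grid).Nodup := by
  apply List.Pairwise.imp ?_ (pvBwater_pairwise grid)
  intro a b hab
  rcases hab with h | ⟨h1, h2⟩
  · exact fun he => by subst he; omega
  · exact fun he => by subst he; omega

theorem pvRowCount (row : List Int) : ∀ (x : Int) (t : Int),
    ((PySem.List.enumerate row t).filterMap (fun yv =>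
      if yv.2 = -1 then some (x, yv.1) else none)).length
    = row.countP (fun c => c == -1) := by
  induction row with
  | nil => intro x t; simp [PySem.List.enumerate_nil]
  | cons c cs ih =>
    intro x t
    rw [PySem.List.enumerate_cons]
    by_cases hc : c = -1 <;> simp [List.filterMap_cons, hc, List.countP_cons, ih]

theorem pvWaterLen (g : List (List Int)) : ∀ (s : Int),
    ((PySem.List.enumerate g s).flatMap (fun xr =>
      (PySem.List.enumerate xr.2 0).filterMap (fun yv =>
        if yv.2 = -1 then some (xr.1, yv.1) else none))).length
    = (g.map (fun row => row.countP (fun c => c == -1))).sum := by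
  induction g with
  | nil => intro s; simp [PySem.List.enumerate_nil]
  | cons r rs ih =>
    intro s
    rw [PySem.List.enumerate_cons]
    simp only [List.flatMap_cons, List.length_append, List.map_cons, List.sum_cons, ih, pvRowCount]

theorem pvRowFold (row : List Int) : ∀ (a : Int),
    row.foldl (fun a c => if c = -1 then a + 1 else a) a
      = a + (row.countP (fun c => c == -1) : Int) := by
  induction row with
  | nil => intro a; simp
  | cons c cs ih =>
    intro a
    by_cases hc : c = -1 <;> simp [List.countP_cons, hc, ih] <;> ring

theorem total_eq (grid : List (List Int)) :
    pvAtotal grid = ((pvBwater grid).length : Int) := by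
  unfold pvAtotal pvBwater
  rw [pvWaterLen]
  have : ∀ (g : List (List Int)) (a : Int),
      g.foldl (fun acc row => row.foldl (fun a c => if c = -1 then a + 1 else a) acc) a
        = a + ((g.map (fun row => row.countP (fun c => c == -1))).sum : Int) := by
    intro g
    induction g with
    | nil => intro a; simp
    | cons r rs ih =>
      intro a
      rw [List.foldl_cons, pvRowFold, ih, List.map_cons, List.sum_cons]
      ring
  simpa using this grid 0

theorem pvAloop_found {grid : List (List Int)} (cs : List (Int × Int)) :
    pvAloop grid cs true =
      match cs.filter (fun c => decide (pvAget grid c = some (-1))) with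
      | [] => true
      | s :: _ => decide (pvAbfs grid [s] PySem.Set.empty 0 = pvAtotal grid) := by
  induction cs with
  | nil => simp [pvAloop]
  | cons c rest ih =>
    by_cases hc : pvAget grid c = some (-1)
    · simp [pvAloop, hc, List.filter_cons]
    · simp [pvAloop, hc, List.filter_cons, ih]

theorem pvAloop_char {grid : List (List Int)} (cs : List (Int × Int)) :
    pvAloop grid cs false =
      match cs.filter (fun c => decide (pvAget grid c = some (-1))) with
      | [] => true
      | [_] => true
      | _ :: s :: _ => decide (pvAbfs grid [s] PySem.Set.empty 0 = pvAtotal grid) := by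
  induction cs with
  | nil => simp [pvAloop]
  | cons c rest ih =>
    by_cases hc : pvAget grid c = some (-1)
    · simp only [pvAloop, hc, if_true, List.filter_cons, decide_eq_true_eq]
      rw [if_neg (by simp), pvAloop_found rest]
      cases h : rest.filter (fun c => decide (pvAget grid c = some (-1))) <;> simp
    · simp only [pvAloop, List.filter_cons]
      rw [if_neg hc, if_neg (by simp [hc])]
      exact ih

-- under Pre_, a water cell always lies in the scanned column window
theorem pvColBound {grid : List (List Int)} (hpre : Pre_is_single_contiguous_water grid)
    {row : List Int} (hrow : row ∈ grid) {y : Int} (h0 : 0 ≤ y)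
    (hget : PySem.List.pyGet? row y = some (-1)) :
    y < ((grid.headD []).length : Int) := by
  rw [PySem.List.pyGet?_of_nonneg _ h0] at hget
  have hy : y.toNat < row.length := by
    by_contra hc
    rw [List.getElem?_eq_none (by omega)] at hget; cases hget
  have hval : row[y.toNat] = -1 := by
    rw [List.getElem?_eq_getElem hy] at hget; exact Option.some.inj hget
  by_contra hc
  have hwle : (grid.headD []).length ≤ y.toNat := by omega
  have hmem : row[y.toNat] ∈ row.drop (grid.headD []).length := by
    have hlt : y.toNat - (grid.headD []).length < (row.drop (grid.headD []).length).length := by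
      rw [List.length_drop]; omega
    have h := List.getElem_mem (l := row.drop (grid.headD []).length) hlt
    rw [List.getElem_drop] at h
    simp only [Nat.add_sub_cancel' hwle] at h
    exact h
  exact (hpre row hrow).2 _ hmem hval

theorem coords_pairwise (grid : List (List Int)) : (pvAcoords grid).Pairwise pvLex := by
  unfold pvAcoords
  rw [List.pairwise_flatMap]
  constructor
  · intro x hx
    rw [List.pairwise_map]
    apply List.Pairwise.imp ?_ (PySem.List.pairwise_lt_pyRange_one _ _)
    intro a b hab
    exact Or.inr ⟨rfl, hab⟩
  · apply List.Pairwise.imp ?_ (PySem.List.pairwise_lt_pyRange_one _ _)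
    intro a b hab u hu v hv
    simp only [List.mem_map] at hu hv
    obtain ⟨_, _, rfl⟩ := hu
    obtain ⟨_, _, rfl⟩ := hv
    exact Or.inl hab

theorem nodup_coords (grid : List (List Int)) : (pvAcoords grid).Nodup := by
  apply List.Pairwise.imp ?_ (coords_pairwise grid)
  intro a b hab
  rcases hab with h | ⟨h1, h2⟩ <;> exact fun he => by subst he; omega

theorem mem_coords {grid : List (List Int)} {c : Int × Int} :
    c ∈ pvAcoords grid ↔ 0 ≤ c.1 ∧ c.1 < (grid.length : Int) ∧ 0 ≤ c.2 ∧
      c.2 < ((grid.headD []).length : Int) := by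
  unfold pvAcoords
  simp only [List.mem_flatMap, List.mem_map, PySem.List.mem_pyRange_one]
  constructor
  · rintro ⟨x, ⟨hx0, hx1⟩, y, ⟨hy0, hy1⟩, rfl⟩
    exact ⟨hx0, hx1, hy0, hy1⟩
  · rintro ⟨h1, h2, h3, h4⟩
    exact ⟨c.1, ⟨h1, h2⟩, c.2, ⟨h3, h4⟩, rfl⟩

theorem coords_filter_eq_water {grid : List (List Int)}
    (hrect : Pre_is_single_contiguous_water grid) :
    (pvAcoords grid).filter (fun c => decide (pvAget grid c = some (-1))) = pvBwater grid := by
  have hmem : ∀ c, (c ∈ (pvAcoords grid).filter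
      (fun c => decide (pvAget grid c = some (-1)))) ↔ c ∈ pvBwater grid := by
    intro c
    rw [List.mem_filter, mem_coords, mem_water_iff]
    constructor
    · rintro ⟨⟨h1, _, h2, _⟩, hP⟩
      exact ⟨h1, h2, of_decide_eq_true hP⟩
    · rintro ⟨h1, h2, hget⟩
      refine ⟨⟨h1, ?_, h2, ?_⟩, decide_eq_true hget⟩
      · unfold pvAget at hget
        cases hr : PySem.List.pyGet? grid c.1 with
        | none => rw [hr] at hget; cases hget
        | some row =>
          have hin : PySem.Raise.InRange grid.length c.1 := by
            by_contra hc
            rw [(PySem.List.pyGet?_eq_none_iff _ _).2 hc] at hr; cases hr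
          unfold PySem.Raise.InRange at hin
          omega
      · unfold pvAget at hget
        cases hr : PySem.List.pyGet? grid c.1 with
        | none => rw [hr] at hget; cases hget
        | some row =>
          rw [hr] at hget
          simp only [Option.bind_some] at hget
          exact pvColBound hrect (PySem.List.mem_of_pyGet?_eq_some _ hr) h2 hget
  have hperm := (List.perm_ext_iff_of_nodup
      ((nodup_coords grid).filter _) (nodup_water grid)).2 hmem
  exact List.Perm.eq_of_pairwise
    (le := pvLex)
    (fun a b _ _ h1 h2 => by rcases h1 with h | ⟨_, _⟩ <;> rcases h2 with h' | ⟨_, _⟩ <;> omega)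
    ((coords_pairwise grid).filter _) (pvBwater_pairwise grid) hperm

def pvBiter (ws : PySem.Set (Int × Int)) (n : Nat) (r : PySem.Set (Int × Int)) :
    PySem.Set (Int × Int) :=
  (List.range n).foldl (fun r _ => pvBstep ws r) r

theorem mem_pvBstep {ws r : PySem.Set (Int × Int)} {c : Int × Int} :
    c ∈ pvBstep ws r ↔
      c ∈ r ∨ ∃ a ∈ r, ∃ d ∈ pvBdirs, c = (a.1 + d.1, a.2 + d.2) ∧ c ∈ ws := by
  unfold pvBstep
  rw [PySem.Set.mem_update]
  simp only [List.mem_flatMap, List.mem_filterMap]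
  constructor
  · rintro (h | ⟨a, ha, d, hd, hif⟩)
    · exact Or.inl h
    · split_ifs at hif with hin
      · obtain rfl := Option.some.inj hif
        exact Or.inr ⟨a, ha, d, hd, rfl, hin⟩
  · rintro (h | ⟨a, ha, d, hd, rfl, hin⟩)
    · exact Or.inl h
    · exact Or.inr ⟨a, ha, d, hd, by rw [if_pos hin]⟩

theorem pvBstep_prefix (ws r : PySem.Set (Int × Int)) : r <+: pvBstep ws r := by
  unfold pvBstep
  rw [PySem.Set.update_eq_append_filter]
  exact ⟨_, rfl⟩

theorem nodup_pvBstep {ws r : PySem.Set (Int × Int)} (h : r.Nodup) :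
    (pvBstep ws r).Nodup := PySem.Set.nodup_update _ _ h

theorem pvBiter_succ (ws : PySem.Set (Int × Int)) (n : Nat) (r : PySem.Set (Int × Int)) :
    pvBiter ws (n + 1) r = pvBstep ws (pvBiter ws n r) := by
  unfold pvBiter
  rw [List.range_succ, List.foldl_append]
  rfl

theorem pvBiter_prefix (ws r : PySem.Set (Int × Int)) (n : Nat) :
    pvBiter ws n r <+: pvBiter ws (n + 1) r := by
  rw [pvBiter_succ]; exact pvBstep_prefix _ _

theorem nodup_pvBiter {ws r : PySem.Set (Int × Int)} (h : r.Nodup) (n : Nat) :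
    (pvBiter ws n r).Nodup := by
  induction n with
  | zero => exact h
  | succ n ih => rw [pvBiter_succ]; exact nodup_pvBstep ih

theorem pvBiter_zero (ws r : PySem.Set (Int × Int)) : pvBiter ws 0 r = r := rfl

theorem pvBiter_subset {ws r : PySem.Set (Int × Int)} (hsub : ∀ c ∈ r, c ∈ ws) (n : Nat) :
    ∀ c ∈ pvBiter ws n r, c ∈ ws := by
  induction n with
  | zero => exact hsub
  | succ n ih =>
    intro c hc
    rw [pvBiter_succ, mem_pvBstep] at hc
    rcases hc with h | ⟨_, _, _, _, _, h⟩
    · exact ih _ h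
    · exact h

theorem pvBiter_mono {ws r : PySem.Set (Int × Int)} {m n : Nat} (h : m ≤ n) :
    pvBiter ws m r <+: pvBiter ws n r := by
  induction n with
  | zero => rw [Nat.le_zero.1 h]
  | succ n ih =>
    rcases Nat.eq_or_lt_of_le h with rfl | h'
    · exact List.prefix_rfl
    · exact (ih (by omega)).trans (pvBiter_prefix _ _ _)

theorem pvBiter_add (ws : PySem.Set (Int × Int)) (k a : Nat) (r : PySem.Set (Int × Int)) :
    pvBiter ws (k + a) r = pvBiter ws a (pvBiter ws k r) := by
  induction a with
  | zero => rfl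
  | succ a ih => rw [← Nat.add_assoc, pvBiter_succ, ih, pvBiter_succ]

-- if one step adds nothing, every later iterate is the same list
theorem pvBstep_fix {ws r : PySem.Set (Int × Int)} (h : pvBstep ws r = r) (m : Nat) :
    pvBiter ws m r = r := by
  induction m with
  | zero => rfl
  | succ m ih => rw [pvBiter_succ, ih, h]

theorem pvLenLe {l l' : List (Int × Int)} (hn : l.Nodup) (hs : ∀ x ∈ l, x ∈ l') :
    l.length ≤ l'.length := by
  have h1 : l.toFinset.card = l.length := List.toFinset_card_of_nodup hn
  have h2 : l.toFinset ⊆ l'.toFinset := by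
    intro x hx; rw [List.mem_toFinset] at hx ⊢; exact hs x hx
  have h3 := Finset.card_le_card h2
  have h4 := l'.toFinset_card_le
  omega

-- saturation: within ws.length rounds the iteration reaches a fixed point
theorem pvBiter_saturated {ws r : PySem.Set (Int × Int)} (hnd : r.Nodup) (hne : r ≠ [])
    (hsub : ∀ c ∈ r, c ∈ ws) :
    pvBstep ws (pvBiter ws ws.length r) = pvBiter ws ws.length r := by
  by_contra hfix
  -- if the final step still grows, every earlier step grew as well (prefix chain),
  -- so each iterate has length ≥ k + 1, contradicting length ≤ ws.length
  have hstepne : ∀ k ≤ ws.length, pvBstep ws (pvBiter ws k r) ≠ pvBiter ws k r := by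
    intro k hk he
    exact hfix (by
      have h1 : pvBiter ws ws.length r = pvBiter ws k r := by
        have h2 : pvBiter ws (ws.length - k) (pvBiter ws k r) = pvBiter ws k r :=
          pvBstep_fix he _
        have h3 := pvBiter_add ws k (ws.length - k) r
        rw [Nat.add_sub_cancel' hk] at h3
        rw [h3, h2]
      rw [h1, he])
  have grow : ∀ k, k ≤ ws.length → k + 1 ≤ (pvBiter ws k r).length := by
    intro k
    induction k with
    | zero =>
      intro _
      have : 0 < r.length := List.length_pos_iff.2 hne
      simpa [pvBiter_zero] using this
    | succ k ih =>
      intro hk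
      have h1 := ih (by omega)
      have hpre := pvBiter_prefix ws r k
      have hlen := hpre.length_le
      rcases Nat.lt_or_ge (pvBiter ws k r).length (pvBiter ws (k + 1) r).length with h | h
      · omega
      · exfalso
        exact hstepne k (by omega)
          (by rw [← pvBiter_succ]; exact (hpre.eq_of_length (by omega)).symm)
  have hle := pvLenLe (nodup_pvBiter hnd ws.length) (pvBiter_subset hsub ws.length)
  have := grow ws.length le_rfl
  omega

theorem pvBiter_sub_rtg {grid : List (List Int)} {w0 : Int × Int}
    (hw0 : w0 ∈ pvBwater grid) (n : Nat) :
    ∀ c ∈ pvBiter (pvBwater grid) n [w0], pvRTG grid w0 c := by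
  induction n with
  | zero =>
    intro c hc
    rw [pvBiter_zero, List.mem_singleton] at hc
    subst hc; exact Relation.ReflTransGen.refl
  | succ n ih =>
    intro c hc
    rw [pvBiter_succ, mem_pvBstep] at hc
    rcases hc with h | ⟨a, ha, d, hd, rfl, hin⟩
    · exact ih _ h
    · refine Relation.ReflTransGen.tail (ih _ ha) ?_
      have haw : a ∈ pvBwater grid :=
        pvBiter_subset (by simpa using hw0) n _ ha
      exact ⟨haw, hin, by simpa using hd⟩

theorem rtg_sub_pvBiter {grid : List (List Int)} {w0 : Int × Int}
    (hw0 : w0 ∈ pvBwater grid) :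
    ∀ c, pvRTG grid w0 c → c ∈ pvBiter (pvBwater grid) (pvBwater grid).length [w0] := by
  have hsat := pvBiter_saturated (ws := pvBwater grid) (r := [w0])
    (List.nodup_singleton w0) (by simp) (by simpa using hw0)
  intro c h
  induction h with
  | refl =>
    exact (pvBiter_mono (ws := pvBwater grid) (r := [w0])
      (Nat.zero_le (pvBwater grid).length)).subset (by simp [pvBiter_zero])
  | tail hab hstep ih =>
    rename_i b c'
    obtain ⟨hbw, hcw, hd⟩ := hstep
    have : c' ∈ pvBstep (pvBwater grid) (pvBiter (pvBwater grid) (pvBwater grid).length [w0]) := by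
      rw [mem_pvBstep]
      refine Or.inr ⟨b, ih, (c'.1 - b.1, c'.2 - b.2), hd, by simp, hcw⟩
    rwa [hsat] at this

theorem pvSetEq {l l' : List (Int × Int)} (hn : l.Nodup) (hn' : l'.Nodup)
    (hs : ∀ x ∈ l, x ∈ l') :
    l.length = l'.length ↔ ∀ x ∈ l', x ∈ l := by
  constructor
  · intro hlen x hx
    have hperm : l.Perm l' := by
      apply List.Subperm.perm_of_length_le _ (by omega)
      exact (List.subperm_ext_iff.2 (fun a ha => by
        rw [List.count_eq_one_of_mem hn ha, List.count_eq_one_of_mem hn' (hs a ha)]))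
    exact hperm.mem_iff.2 hx
  · intro hall
    have h1 := pvLenLe hn hs
    have h2 := pvLenLe hn' hall
    omega

theorem alt_char {grid : List (List Int)} (hn : 2 ≤ (pvBwater grid).length) :
    is_single_contiguous_water_alt grid = true
      ↔ (∀ c ∈ pvBwater grid, pvRTG grid ((pvBwater grid).headD (0, 0)) c) := by
  have hw0 : (pvBwater grid).headD (0, 0) ∈ pvBwater grid := by
    cases hW : pvBwater grid with
    | nil => rw [hW] at hn; simp at hn
    | cons a t => simp
  unfold is_single_contiguous_water_alt
  rw [if_neg (by omega)]
  have hofl : PySem.Set.ofList (pvBwater grid) = pvBwater grid :=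
    PySem.Set.ofList_eq_self_of_nodup _ (nodup_water grid)
  have hofl1 : PySem.Set.ofList [(pvBwater grid).headD (0, 0)] = [(pvBwater grid).headD (0, 0)] :=
    PySem.Set.ofList_eq_self_of_nodup _ (List.nodup_singleton _)
  rw [hofl, hofl1]
  have hiter : ((List.range (pvBwater grid).length).foldl
      (fun r _ => pvBstep (pvBwater grid) r) [(pvBwater grid).headD (0, 0)])
      = pvBiter (pvBwater grid) (pvBwater grid).length [(pvBwater grid).headD (0, 0)] := rfl
  simp only [] at *
  rw [hiter, decide_eq_true_eq]
  rw [pvSetEq (nodup_pvBiter (List.nodup_singleton _) _) (nodup_water grid)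
      (pvBiter_subset (by simpa using hw0) _)]
  constructor
  · intro h c hc
    exact pvBiter_sub_rtg hw0 _ c (h c hc)
  · intro h c hc
    exact rtg_sub_pvBiter hw0 c (h c hc)

def pvReach (grid : List (List Int)) (s : Int × Int) : Finset (Int × Int) :=
  (pvBiter (pvBwater grid) (pvBwater grid).length [s]).toFinset

def pvU (grid : List (List Int)) (queue : List (Int × Int))
    (visited : PySem.Set (Int × Int)) : Finset (Int × Int) :=
  visited.toFinset ∪ queue.toFinset.biUnion (pvReach grid)

theorem mem_pvReach {grid : List (List Int)} {s c : Int × Int} (hs : s ∈ pvBwater grid) :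
    c ∈ pvReach grid s ↔ c ∈ pvBwater grid ∧ pvRTG grid s c := by
  unfold pvReach
  rw [List.mem_toFinset]
  constructor
  · intro h
    exact ⟨pvBiter_subset (by simpa using hs) _ c h, pvBiter_sub_rtg hs _ c h⟩
  · rintro ⟨hw, hr⟩
    exact rtg_sub_pvBiter hs c hr

theorem self_mem_pvReach {grid : List (List Int)} {s : Int × Int}
    (h : s ∈ pvBwater grid) : s ∈ pvReach grid s :=
  (mem_pvReach h).2 ⟨h, Relation.ReflTransGen.refl⟩

theorem pvExit {grid : List (List Int)} {V S : List (Int × Int)} {c : Int × Int}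
    (hS : ∀ b ∈ S, b ∈ pvBwater grid)
    (hcl : ∀ v ∈ V, ∀ b, pvAdj grid v b → b ∈ V ∨ b ∈ S) (hc : c ∈ V) :
    ∀ x, pvRTG grid c x → x ∈ V.toFinset ∪ S.toFinset.biUnion (pvReach grid) := by
  intro x h
  induction h with
  | refl => exact Finset.mem_union_left _ (List.mem_toFinset.2 hc)
  | tail hcb hstep ih =>
    rename_i b x'
    rcases Finset.mem_union.1 ih with hb | hb
    · rcases hcl b (List.mem_toFinset.1 hb) x' hstep with h' | h'
      · exact Finset.mem_union_left _ (List.mem_toFinset.2 h')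
      · exact Finset.mem_union_right _ (Finset.mem_biUnion.2
          ⟨x', List.mem_toFinset.2 h', self_mem_pvReach hstep.2.1⟩)
    · obtain ⟨q, hq, hbq⟩ := Finset.mem_biUnion.1 hb
      have hqW := hS q (List.mem_toFinset.1 hq)
      exact Finset.mem_union_right _ (Finset.mem_biUnion.2
        ⟨q, hq, (mem_pvReach hqW).2 ⟨hstep.2.1, ((mem_pvReach hqW).1 hbq).2.tail hstep⟩⟩)

theorem mem_neighbors_iff {grid : List (List Int)} {x y : Int} {b : Int × Int} :
    b ∈ pvAneighbors grid x y ↔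
      ((b.1 - x, b.2 - y) ∈ pvBdirs ∧ 0 ≤ b.1 ∧ b.1 < (grid.length : Int) ∧
        0 ≤ b.2 ∧ b.2 < ((grid.headD []).length : Int)) := by
  unfold pvAneighbors
  simp only [List.mem_filterMap]
  constructor
  · rintro ⟨d, hd, hif⟩
    split_ifs at hif with hcond
    obtain rfl := Option.some.inj hif
    simp only [add_sub_cancel_left]
    exact ⟨hd, hcond.1, hcond.2.1, hcond.2.2.1, hcond.2.2.2⟩
  · rintro ⟨hd, h1, h2, h3, h4⟩
    refine ⟨(b.1 - x, b.2 - y), hd, ?_⟩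
    rw [if_pos (by refine ⟨by omega, by omega, by omega, by omega⟩)]
    simp only [Option.some.injEq, Prod.ext_iff]
    constructor <;> omega

theorem adj_iff_neighbor {grid : List (List Int)}
    (hrect : Pre_is_single_contiguous_water grid) {c b : Int × Int}
    (hc : c ∈ pvBwater grid) :
    pvAdj grid c b ↔ (b ∈ pvAneighbors grid c.1 c.2 ∧ pvAget grid b = some (-1)) := by
  constructor
  · rintro ⟨_, hb, hd⟩
    obtain ⟨h1, h2, hget⟩ := mem_water_iff.1 hb
    refine ⟨mem_neighbors_iff.2 ⟨hd, h1, ?_, h2, ?_⟩, hget⟩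
    · unfold pvAget at hget
      cases hr : PySem.List.pyGet? grid b.1 with
      | none => rw [hr] at hget; cases hget
      | some row =>
        have hin : PySem.Raise.InRange grid.length b.1 := by
          by_contra hcon
          rw [(PySem.List.pyGet?_eq_none_iff _ _).2 hcon] at hr; cases hr
        unfold PySem.Raise.InRange at hin
        omega
    · unfold pvAget at hget
      cases hr : PySem.List.pyGet? grid b.1 with
      | none => rw [hr] at hget; cases hget
      | some row =>
        rw [hr] at hget
        simp only [Option.bind_some] at hget
        exact pvColBound hrect (PySem.List.mem_of_pyGet?_eq_some _ hr) h2 hget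
  · rintro ⟨hnb, hget⟩
    obtain ⟨hd, h1, _, h2, _⟩ := mem_neighbors_iff.1 hnb
    exact ⟨hc, mem_water_iff.2 ⟨h1, h2, hget⟩, hd⟩

theorem pvU_pop_mem {grid : List (List Int)} {rest V : List (Int × Int)} {c : Int × Int}
    (hcW : c ∈ pvBwater grid) (hrestW : ∀ b ∈ rest, b ∈ pvBwater grid)
    (hc : c ∈ V)
    (hcl : ∀ v ∈ V, ∀ b, pvAdj grid v b → b ∈ V ∨ b ∈ (rest ++ [c])) :
    pvU grid (rest ++ [c]) V = pvU grid rest V := by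
  unfold pvU
  have hsplit : (rest ++ [c]).toFinset.biUnion (pvReach grid)
      = rest.toFinset.biUnion (pvReach grid) ∪ pvReach grid c := by
    rw [List.toFinset_append, Finset.union_biUnion]
    simp
  rw [hsplit]
  have hcl' : ∀ v ∈ V, ∀ b, pvAdj grid v b → b ∈ V ∨ b ∈ rest := by
    intro v hv b hb
    rcases hcl v hv b hb with h | h
    · exact Or.inl h
    · rcases List.mem_append.1 h with h | h
      · exact Or.inr h
      · exact Or.inl (by rwa [List.mem_singleton.1 h])
  have hRc : pvReach grid c ⊆ V.toFinset ∪ rest.toFinset.biUnion (pvReach grid) := by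
    intro x hx
    exact pvExit hrestW hcl' hc x ((mem_pvReach hcW).1 hx).2
  rw [← Finset.union_assoc]
  exact Finset.union_eq_left.2 (fun x hx => by
    rcases Finset.mem_union.1 (hRc hx) with h | h
    · exact Finset.mem_union_left _ h
    · exact Finset.mem_union_right _ h)

theorem pvAbfs_spec {grid : List (List Int)} (hrect : Pre_is_single_contiguous_water grid) :
    ∀ (queue : List (Int × Int)) (visited : PySem.Set (Int × Int)) (count : Int),
    visited.Nodup →
    (∀ c ∈ visited, c ∈ pvBwater grid) →
    (∀ c ∈ queue, c ∈ pvBwater grid) →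
    (∀ v ∈ visited, ∀ b, pvAdj grid v b → b ∈ visited ∨ b ∈ queue) →
    pvAbfs grid queue visited count
      = count - visited.length + ((pvU grid queue visited).card : Int) := by
  intro queue visited count
  induction queue, visited, count using pvAbfs.induct grid with
  | case1 queue visited count hq =>
    intro hnd hvw hqw hcl
    have hqnil : queue = [] := List.getLast?_eq_none_iff.1 hq
    subst hqnil
    rw [pvAbfs.eq_def]
    simp only [List.getLast?_nil]
    unfold pvU
    simp only [List.toFinset_nil, Finset.biUnion_empty, Finset.union_empty]
    rw [List.toFinset_card_of_nodup hnd]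
    omega
  | case2 queue visited count c hq rest hv ih =>
    intro hnd hvw hqw hcl
    have hsplit := List.dropLast_append_getLast? c hq
    rw [pvAbfs.eq_def, hq]
    simp only [dif_pos hv]
    have hcl2 : ∀ v ∈ visited, ∀ b, pvAdj grid v b → b ∈ visited ∨ b ∈ queue.dropLast := by
      intro v hvm b hb
      rcases hcl v hvm b hb with h | h
      · exact Or.inl h
      · rw [← hsplit] at h
        rcases List.mem_append.1 h with h | h
        · exact Or.inr h
        · exact Or.inl (by rw [List.mem_singleton.1 h]; exact hv)
    rw [ih hnd hvw (fun b hb => hqw b (by rw [← hsplit]; exact List.mem_append_left _ hb)) hcl2]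
    have hU : pvU grid queue visited = pvU grid queue.dropLast visited := by
      conv_lhs => rw [← hsplit]
      exact pvU_pop_mem (hqw c (List.mem_of_getLast? hq))
        (fun b hb => hqw b (by rw [← hsplit]; exact List.mem_append_left _ hb))
        hv (by rw [hsplit]; exact hcl)
    rw [hU]
  | case3 queue visited count c hq hv hg =>
    intro hnd hvw hqw hcl
    exfalso
    have hcW := hqw c (List.mem_of_getLast? hq)
    obtain ⟨_, _, hget⟩ := mem_water_iff.1 hcW
    rw [hget] at hg; cases hg
  | case4 queue visited count c hq rest hv visited' hg ih =>
    intro hnd hvw hqw hcl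
    have hsplit := List.dropLast_append_getLast? c hq
    have hcW := hqw c (List.mem_of_getLast? hq)
    rw [pvAbfs.eq_def, hq]
    simp only [dif_neg hv]
    -- invariants for the recursive call
    have hnd' : (visited.add c).Nodup := PySem.Set.nodup_add _ _ hnd
    have hvw' : ∀ b ∈ visited.add c, b ∈ pvBwater grid := by
      intro b hb
      rcases (PySem.Set.mem_add _ _ _).1 hb with h | rfl
      · exact hvw b h
      · exact hcW
    have hfilW : ∀ b ∈ (pvAneighbors grid c.1 c.2).filter
        (fun b => decide (b ∉ visited.add c) && decide (pvAget grid b = some (-1))),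
        b ∈ pvBwater grid := by
      intro b hb
      obtain ⟨hnb, hcond⟩ := List.mem_filter.1 hb
      rw [Bool.and_eq_true, decide_eq_true_eq, decide_eq_true_eq] at hcond
      obtain ⟨_, h1, _, h2, _⟩ := mem_neighbors_iff.1 hnb
      exact mem_water_iff.2 ⟨h1, h2, hcond.2⟩
    have hqw' : ∀ b ∈ rest ++ (pvAneighbors grid c.1 c.2).filter
        (fun b => decide (b ∉ visited.add c) && decide (pvAget grid b = some (-1))),
        b ∈ pvBwater grid := by
      intro b hb
      rcases List.mem_append.1 hb with h | h
      · exact hqw b (by rw [← hsplit]; exact List.mem_append_left _ h)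
      · exact hfilW b h
    have hcl' : ∀ v ∈ visited.add c, ∀ b, pvAdj grid v b →
        b ∈ visited.add c ∨ b ∈ rest ++ (pvAneighbors grid c.1 c.2).filter
          (fun b => decide (b ∉ visited.add c) && decide (pvAget grid b = some (-1))) := by
      intro v hvm b hb
      rcases (PySem.Set.mem_add _ _ _).1 hvm with h | hvc
      · rcases hcl v h b hb with h' | h'
        · exact Or.inl ((PySem.Set.mem_add _ _ _).2 (Or.inl h'))
        · rw [← hsplit] at h'
          rcases List.mem_append.1 h' with h'' | h''
          · exact Or.inr (List.mem_append_left _ h'')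
          · exact Or.inl ((PySem.Set.mem_add _ _ _).2 (Or.inr (List.mem_singleton.1 h'')))
      · obtain ⟨hnb, hget⟩ := (adj_iff_neighbor hrect hcW).1 (hvc ▸ hb)
        by_cases hbv : b ∈ visited.add c
        · exact Or.inl hbv
        · refine Or.inr (List.mem_append_right _ (List.mem_filter.2 ⟨hnb, ?_⟩))
          rw [Bool.and_eq_true, decide_eq_true_eq, decide_eq_true_eq]
          exact ⟨hbv, hget⟩
    have hlen : (visited.add c).length = visited.length + 1 := by
      rw [PySem.Set.add_of_not_mem hv, List.length_append]; rfl
    have hUeq : pvU grid (rest ++ (pvAneighbors grid c.1 c.2).filter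
          (fun b => decide (b ∉ visited.add c) && decide (pvAget grid b = some (-1))))
          (visited.add c)
        = pvU grid queue visited := by
      have hcq : c ∈ queue := List.mem_of_getLast? hq
      apply Finset.Subset.antisymm
      · intro x hx
        rcases Finset.mem_union.1 hx with hxv | hxr
        · rcases (PySem.Set.mem_add _ _ _).1 (List.mem_toFinset.1 hxv) with h | hxc
          · exact Finset.mem_union_left _ (List.mem_toFinset.2 h)
          · exact hxc ▸ Finset.mem_union_right _ (Finset.mem_biUnion.2
              ⟨c, List.mem_toFinset.2 hcq, self_mem_pvReach hcW⟩)
        · obtain ⟨q, hqmem, hxq⟩ := Finset.mem_biUnion.1 hxr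
          rcases List.mem_append.1 (List.mem_toFinset.1 hqmem) with h | h
          · exact Finset.mem_union_right _ (Finset.mem_biUnion.2
              ⟨q, List.mem_toFinset.2 (by rw [← hsplit]; exact List.mem_append_left _ h), hxq⟩)
          · -- q is a freshly pushed neighbour of c
            obtain ⟨hnb, hcond⟩ := List.mem_filter.1 h
            rw [Bool.and_eq_true, decide_eq_true_eq, decide_eq_true_eq] at hcond
            have hadj : pvAdj grid c q := (adj_iff_neighbor hrect hcW).2 ⟨hnb, hcond.2⟩
            obtain ⟨hxw, hrtg⟩ := (mem_pvReach (hfilW q h)).1 hxq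
            exact Finset.mem_union_right _ (Finset.mem_biUnion.2
              ⟨c, List.mem_toFinset.2 hcq,
                (mem_pvReach hcW).2 ⟨hxw, Relation.ReflTransGen.head hadj hrtg⟩⟩)
      · intro x hx
        rcases Finset.mem_union.1 hx with hxv | hxr
        · exact Finset.mem_union_left _ (List.mem_toFinset.2
            ((PySem.Set.mem_add _ _ _).2 (Or.inl (List.mem_toFinset.1 hxv))))
        · obtain ⟨q, hqmem, hxq⟩ := Finset.mem_biUnion.1 hxr
          rw [List.mem_toFinset, ← hsplit] at hqmem
          rcases List.mem_append.1 hqmem with h | h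
          · exact Finset.mem_union_right _ (Finset.mem_biUnion.2
              ⟨q, List.mem_toFinset.2 (List.mem_append_left _ h), hxq⟩)
          · rw [List.mem_singleton.1 h] at hxq
            exact pvExit hqw' hcl' ((PySem.Set.mem_add _ _ _).2 (Or.inr rfl)) x
              ((mem_pvReach hcW).1 hxq).2
    split
    · next heq => rw [hg] at heq; cases heq
    · next v heq =>
      rw [hg] at heq
      obtain rfl : v = -1 := (Option.some.inj heq).symm
      rw [if_pos rfl]
      rw [ih hnd' hvw' hqw' hcl']
      rw [hUeq, hlen]
      push_cast
      ring
  | case5 queue visited count c hq hv v hg hne =>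
    intro hnd hvw hqw hcl
    exfalso
    have hcW := hqw c (List.mem_of_getLast? hq)
    obtain ⟨_, _, hget⟩ := mem_water_iff.1 hcW
    rw [hget] at hg
    exact hne (Option.some.inj hg).symm

theorem reach_card_iff {grid : List (List Int)} {s : Int × Int} (hs : s ∈ pvBwater grid) :
    ((pvReach grid s).card = (pvBwater grid).length
      ↔ ∀ c ∈ pvBwater grid, pvRTG grid s c) := by
  have hsub : pvReach grid s ⊆ (pvBwater grid).toFinset := by
    intro x hx; exact List.mem_toFinset.2 ((mem_pvReach hs).1 hx).1
  have hcard : (pvBwater grid).toFinset.card = (pvBwater grid).length :=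
    List.toFinset_card_of_nodup (nodup_water grid)
  constructor
  · intro h c hc
    have heq : pvReach grid s = (pvBwater grid).toFinset :=
      Finset.eq_of_subset_of_card_le hsub (by omega)
    have : c ∈ pvReach grid s := heq ▸ List.mem_toFinset.2 hc
    exact ((mem_pvReach hs).1 this).2
  · intro h
    have heq : pvReach grid s = (pvBwater grid).toFinset := by
      apply Finset.Subset.antisymm hsub
      intro x hx
      exact (mem_pvReach hs).2 ⟨List.mem_toFinset.1 hx, h x (List.mem_toFinset.1 hx)⟩
    rw [heq, hcard]

theorem rtg_start_swap {grid : List (List Int)} {s t : Int × Int}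
    (hs : s ∈ pvBwater grid) (ht : t ∈ pvBwater grid) :
    (∀ c ∈ pvBwater grid, pvRTG grid s c) ↔ (∀ c ∈ pvBwater grid, pvRTG grid t c) := by
  constructor
  · intro h c hc
    exact Relation.ReflTransGen.trans (pvRTG_symm (h t ht)) (h c hc)
  · intro h c hc
    exact Relation.ReflTransGen.trans (pvRTG_symm (h s hs)) (h c hc)

theorem is_single_contiguous_water_spec' :
    ∀ (grid : List (List Int)), Pre_is_single_contiguous_water grid →
      is_single_contiguous_water grid = is_single_contiguous_water_alt grid := by
  intro grid hpre
  unfold is_single_contiguous_water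
  rw [pvAloop_char, coords_filter_eq_water hpre]
  cases hW : pvBwater grid with
  | nil =>
    unfold is_single_contiguous_water_alt
    rw [hW]
    rfl
  | cons w0 t =>
    cases t with
    | nil =>
      unfold is_single_contiguous_water_alt
      rw [hW]
      rfl
    | cons s2 t2 =>
      have hn : 2 ≤ (pvBwater grid).length := by rw [hW]; simp
      have hw0 : w0 ∈ pvBwater grid := by rw [hW]; exact List.mem_cons_self
      have hs2 : s2 ∈ pvBwater grid := by rw [hW]; simp
      have hbfs := pvAbfs_spec hpre [s2] PySem.Set.empty 0
        List.nodup_nil (by intro c hc; cases hc)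
        (by intro c hc; rw [List.mem_singleton.1 hc]; exact hs2)
        (by intro v hv; cases hv)
      have hU : pvU grid [s2] PySem.Set.empty = pvReach grid s2 := by
        unfold pvU
        simp
      rw [hU] at hbfs
      have hA : decide (pvAbfs grid [s2] PySem.Set.empty 0 = pvAtotal grid) = true
          ↔ (∀ c ∈ pvBwater grid, pvRTG grid s2 c) := by
        rw [decide_eq_true_eq, hbfs, total_eq]
        have hz : (0 : Int) - ((List.length (PySem.Set.empty : PySem.Set (Int × Int))) : Int)
            + ((pvReach grid s2).card : Int) = ((pvReach grid s2).card : Int) := by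
          simp [PySem.Set.empty]
        rw [hz]
        rw [show (((pvReach grid s2).card : Int) = ((pvBwater grid).length : Int))
            ↔ ((pvReach grid s2).card = (pvBwater grid).length) from Int.natCast_inj]
        exact reach_card_iff hs2
      have hB := alt_char hn
      rw [hW] at hB
      simp only [List.headD_cons] at hB
      rw [← hW] at hB
      have hiff := rtg_start_swap hs2 hw0
      have hfin : ∀ (x y : Bool), (x = true ↔ y = true) → x = y := by decide
      apply hfin
      rw [hA, hB]
      exact hiff

-- ===== VERDICT (by name: the statement is the Claim_ definition above) =====
theorem is_single_contiguous_water_spec : Claim_equal_is_single_contiguous_water := by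
  intro grid _hdom hpre
  unfold Spec_is_single_contiguous_water
  exact is_single_contiguous_water_spec' grid hpre
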